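-- pv_equiv track=rewrite | github.com/cristianvnt/GeneRT | src/geneInfoFetching/GeneGraph.py | parse_kegg_response
-- ===== SOURCE A (Python) =====
-- def parse_kegg_response(text):
--     """Parse flat KEGG file into a dictionary"""
--     result = {}
--     current_key = None
--     current_value = ""
--
--     for line in text.splitlines():
--         if line[:12].strip().isupper():
--             if current_key:
--                 result[current_key] = current_value.strip()
--             current_key = line[:12].strip()
--             current_value = line[12:].strip()
--         else:
--             current_value += "\n" + line.strip()
--
--     if current_key:
--         result[current_key] = current_value.strip()
--
--     return result
-- ===== SOURCE B (Python) =====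
-- def parse_kegg_response(text):
--     """Parse flat KEGG file into a dictionary"""
--     lines = text.splitlines()
--     starts = [i for i, line in enumerate(lines) if line[:12].strip().isupper()]
--     result = {}
--     for s, e in zip(starts, starts[1:] + [len(lines)]):
--         key = lines[s][:12].strip()
--         parts = [lines[s][12:].strip()] + [l.strip() for l in lines[s + 1:e]]
--         result[key] = "\n".join(parts).strip()
--     return result
-- ===== Notes on version B (the rewrite author's own statement) =====
-- stated objective: alternative
-- what changed: A's single-pass state machine (mutable dict, current_key, string accumulator) is replaced by an index-based two-stage algorithm: first compute the positions of all header lines with enumerate, then slice each block out of the line list between consecutive header positions and join/strip it.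
import Mathlib
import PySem

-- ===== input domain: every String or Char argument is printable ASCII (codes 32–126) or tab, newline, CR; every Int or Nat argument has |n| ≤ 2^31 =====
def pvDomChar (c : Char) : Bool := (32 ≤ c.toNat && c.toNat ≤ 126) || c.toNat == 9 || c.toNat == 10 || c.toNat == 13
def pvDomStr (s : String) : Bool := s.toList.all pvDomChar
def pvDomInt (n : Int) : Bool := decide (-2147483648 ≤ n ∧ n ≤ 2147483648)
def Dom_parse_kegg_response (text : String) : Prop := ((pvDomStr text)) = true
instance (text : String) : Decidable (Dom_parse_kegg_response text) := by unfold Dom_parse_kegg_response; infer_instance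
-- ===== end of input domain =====

-- B replaces A's stateful accumulator loop by an index-based two-stage algorithm: first
-- compute the positions of all header lines, then slice each block out of the line list
-- by consecutive positions; objective: alternative decomposition, same cost.

-- str.isupper(): at least one cased char and no lowercase char — ported by hand (no PySem
-- primitive); exact on the ASCII domain, where 'cased' = isalpha.
def pvIsupper (cs : List Char) : Bool :=
  cs.any PySem.Chars.isalpha && cs.all (fun c => !PySem.Chars.islower c)

-- line[:12].strip().isupper() — the header test both Pythons share verbatim
def pvIsHdrLine (line : List Char) : Bool :=
  pvIsupper (PySem.Chars.strip (PySem.Chars.slice line none (some 12)))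

-- ===== PORT A =====
-- loop state: (result, current_key, current_value)
def pvStepA (st : PySem.Dict (List Char) (List Char) × Option (List Char) × List Char)
    (line : List Char) : PySem.Dict (List Char) (List Char) × Option (List Char) × List Char :=
  if pvIsHdrLine line then
    let d := match st.2.1 with
      | some k => if k ≠ [] then st.1.insert k (PySem.Chars.strip st.2.2) else st.1
      | none => st.1
    (d, some (PySem.Chars.strip (PySem.Chars.slice line none (some 12))),
     PySem.Chars.strip (PySem.Chars.slice line (some 12) none))
  else
    (st.1, st.2.1, st.2.2 ++ '\n' :: PySem.Chars.strip line)

-- the code after A's loop: the final flush and the return of the dict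
def pvFinishA (st : PySem.Dict (List Char) (List Char) × Option (List Char) × List Char) :
    List (String × String) :=
  let d := match st.2.1 with
    | some k => if k ≠ [] then st.1.insert k (PySem.Chars.strip st.2.2) else st.1
    | none => st.1
  d.items.map (fun kv => (String.ofList kv.1, String.ofList kv.2))

def parse_kegg_response (text : String) : List (String × String) :=
  pvFinishA (((PySem.Str.splitlines text).map String.toList).foldl pvStepA (PySem.Dict.empty, none, []))

-- ===== PORT B =====
-- starts = [i for i, line in enumerate(lines) if line[:12].strip().isupper()]
def pvStarts (lines : List (List Char)) : List Int :=
  ((PySem.List.enumerate lines 0).filter (fun p => pvIsHdrLine p.2)).map (fun p => p.1)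

def parse_kegg_response_alt (text : String) : List (String × String) :=
  let lines := (PySem.Str.splitlines text).map String.toList
  let starts := pvStarts lines
  let result := (starts.zip (starts.drop 1 ++ [(lines.length : Int)])).foldl
    (fun d se =>
      let line := PySem.List.pyGetD lines se.1 []   -- lines[s]; s is a valid index, so getD is exact
      let key := PySem.Chars.strip (PySem.Chars.slice line none (some 12))
      let parts := PySem.Chars.strip (PySem.Chars.slice line (some 12) none) ::
        (PySem.List.slice lines (some (se.1 + 1)) (some se.2)).map PySem.Chars.strip
      d.insert key (PySem.Chars.strip (PySem.Chars.join ['\n'] parts)))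
    PySem.Dict.empty
  result.items.map (fun kv => (String.ofList kv.1, String.ofList kv.2))

-- ===== PRECONDITION & SPEC =====
def Spec_parse_kegg_response (text : String) (out : List (String × String)) : Prop := out = parse_kegg_response_alt text
instance (text : String) (out : List (String × String)) : Decidable (Spec_parse_kegg_response text out) := by unfold Spec_parse_kegg_response; infer_instance

-- ===== CLAIM (what is proved, stated in full; the proofs are below) =====
def Claim_equal_parse_kegg_response : Prop := ∀ (text : String), Dom_parse_kegg_response text → Spec_parse_kegg_response text (parse_kegg_response text)

-- ===== LEMMAS AND PROOFS =====

-- proof-side intermediate: the state-machine grouping of lines into ordered blocks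
def pvAppendLast (bs : List (List Char × List (List Char))) (p : List Char) :
    List (List Char × List (List Char)) :=
  match bs with
  | [] => []
  | [b] => [(b.1, b.2 ++ [p])]
  | b :: rest => b :: pvAppendLast rest p

def pvStepB (bs : List (List Char × List (List Char))) (line : List Char) :
    List (List Char × List (List Char)) :=
  if pvIsHdrLine line then
    bs ++ [(PySem.Chars.strip (PySem.Chars.slice line none (some 12)),
            [PySem.Chars.strip (PySem.Chars.slice line (some 12) none)])]
  else if bs ≠ [] then pvAppendLast bs (PySem.Chars.strip line)
  else bs

def pvBuildB (bs : List (List Char × List (List Char))) : PySem.Dict (List Char) (List Char) :=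
  bs.foldl (fun d b => d.insert b.1 (PySem.Chars.strip (PySem.Chars.join ['\n'] b.2))) PySem.Dict.empty

def pvRender (d : PySem.Dict (List Char) (List Char)) : List (String × String) :=
  d.items.map (fun kv => (String.ofList kv.1, String.ofList kv.2))

-- proof-side intermediate: recursive segmentation of the line list at header lines
def pvSeg : List (List Char) → List (List Char × List (List Char))
  | [] => []
  | l :: rest =>
    if pvIsHdrLine l then
      (PySem.Chars.strip (PySem.Chars.slice l none (some 12)),
       PySem.Chars.strip (PySem.Chars.slice l (some 12) none) ::
         (rest.takeWhile (fun x => !pvIsHdrLine x)).map PySem.Chars.strip)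
        :: pvSeg (rest.dropWhile (fun x => !pvIsHdrLine x))
    else pvSeg rest
  termination_by ls => ls.length
  decreasing_by
  · have := List.length_dropWhile_le (fun x => !pvIsHdrLine x) rest
    simp; omega
  · simp

-- B's per-bound block, and B's block list
def pvBlockOf (lines : List (List Char)) (se : Int × Int) : List Char × List (List Char) :=
  let line := PySem.List.pyGetD lines se.1 []
  (PySem.Chars.strip (PySem.Chars.slice line none (some 12)),
   PySem.Chars.strip (PySem.Chars.slice line (some 12) none) ::
     (PySem.List.slice lines (some (se.1 + 1)) (some se.2)).map PySem.Chars.strip)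

def pvBlocks (lines : List (List Char)) : List (List Char × List (List Char)) :=
  ((pvStarts lines).zip ((pvStarts lines).drop 1 ++ [(lines.length : Int)])).map (pvBlockOf lines)

theorem pvSeg_nil : pvSeg [] = [] := by rw [pvSeg.eq_def]

theorem pvSeg_cons (l : List Char) (rest : List (List Char)) :
    pvSeg (l :: rest)
      = if pvIsHdrLine l then
          (PySem.Chars.strip (PySem.Chars.slice l none (some 12)),
           PySem.Chars.strip (PySem.Chars.slice l (some 12) none) ::
             (rest.takeWhile (fun x => !pvIsHdrLine x)).map PySem.Chars.strip)
            :: pvSeg (rest.dropWhile (fun x => !pvIsHdrLine x))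
        else pvSeg rest := by
  rw [pvSeg.eq_def]

-- the invariant tying A's loop state to the block list
def pvRel (st : PySem.Dict (List Char) (List Char) × Option (List Char) × List Char)
    (bs : List (List Char × List (List Char))) : Prop :=
  match st.2.1 with
  | none => st.1 = PySem.Dict.empty ∧ bs = []
  | some k => k ≠ [] ∧ ∃ flushed parts, bs = flushed ++ [(k, parts)] ∧ parts ≠ [] ∧
      st.2.2 = PySem.Chars.join ['\n'] parts ∧ st.1 = pvBuildB flushed

theorem pvIsupper_ne_nil {cs : List Char} (h : pvIsupper cs = true) : cs ≠ [] := by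
  rintro rfl; simp [pvIsupper] at h

theorem pvJoin_append_singleton (parts : List (List Char)) (p : List Char) (h : parts ≠ []) :
    PySem.Chars.join ['\n'] (parts ++ [p])
      = PySem.Chars.join ['\n'] parts ++ '\n' :: p := by
  induction parts with
  | nil => simp at h
  | cons a rest ih =>
    cases rest with
    | nil => simp [PySem.Chars.join_cons_cons, PySem.Chars.join_singleton]
    | cons b r =>
      have ih' := ih (by simp)
      simp only [List.cons_append] at ih' ⊢
      rw [PySem.Chars.join_cons_cons, PySem.Chars.join_cons_cons, ih']
      simp

theorem pvAppendLast_eq (flushed : List (List Char × List (List Char))) (k : List Char)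
    (parts : List (List Char)) (p : List Char) :
    pvAppendLast (flushed ++ [(k, parts)]) p = flushed ++ [(k, parts ++ [p])] := by
  induction flushed with
  | nil => simp [pvAppendLast]
  | cons a rest ih =>
    cases rest with
    | nil => simp [pvAppendLast]
    | cons b r => simpa [pvAppendLast] using ih

theorem pvBuildB_append_singleton (flushed : List (List Char × List (List Char)))
    (k : List Char) (parts : List (List Char)) :
    pvBuildB (flushed ++ [(k, parts)])
      = (pvBuildB flushed).insert k (PySem.Chars.strip (PySem.Chars.join ['\n'] parts)) := by
  simp [pvBuildB]

theorem pvStep_rel (st : PySem.Dict (List Char) (List Char) × Option (List Char) × List Char)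
    (bs : List (List Char × List (List Char))) (line : List Char) (h : pvRel st bs) :
    pvRel (pvStepA st line) (pvStepB bs line) := by
  obtain ⟨d, ck, cv⟩ := st
  by_cases hup : pvIsHdrLine line = true
  · cases ck with
    | none =>
      obtain ⟨hd, hbs⟩ := h
      subst hd hbs
      simp only [pvStepA, pvStepB, hup, pvRel, if_pos]
      exact ⟨pvIsupper_ne_nil hup, [],
        [PySem.Chars.strip (PySem.Chars.slice line (some 12) none)],
        by simp, by simp, (PySem.Chars.join_singleton _ _).symm, by simp [pvBuildB]⟩
    | some k =>
      obtain ⟨hk, flushed, parts, hbs, hparts, hcv, hd⟩ := h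
      simp only at hcv hd
      subst hbs hcv hd
      simp only [pvStepA, pvStepB, hup, pvRel, hk, ne_eq, not_false_iff, if_pos]
      exact ⟨pvIsupper_ne_nil hup, flushed ++ [(k, parts)],
        [PySem.Chars.strip (PySem.Chars.slice line (some 12) none)],
        by simp, by simp, (PySem.Chars.join_singleton _ _).symm,
        (pvBuildB_append_singleton flushed k parts).symm⟩
  · cases ck with
    | none =>
      obtain ⟨hd, hbs⟩ := h
      subst hd hbs
      simp only [pvStepA, pvStepB, hup, pvRel]
      exact ⟨rfl, by simp⟩
    | some k =>
      obtain ⟨hk, flushed, parts, hbs, hparts, hcv, hd⟩ := h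
      simp only at hcv hd
      subst hbs hcv hd
      simp only [pvStepA, pvStepB, hup, pvRel]
      refine ⟨hk, flushed, parts ++ [PySem.Chars.strip line], ?_, by simp, ?_, rfl⟩
      · simp [pvAppendLast_eq]
      · exact (pvJoin_append_singleton parts _ hparts).symm

theorem pvFold_rel (lines : List (List Char))
    (st : PySem.Dict (List Char) (List Char) × Option (List Char) × List Char)
    (bs : List (List Char × List (List Char))) (h : pvRel st bs) :
    pvRel (lines.foldl pvStepA st) (lines.foldl pvStepB bs) := by
  induction lines generalizing st bs with
  | nil => exact h
  | cons l rest ih => exact ih _ _ (pvStep_rel st bs l h)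

theorem pvFinish_rel (st : PySem.Dict (List Char) (List Char) × Option (List Char) × List Char)
    (bs : List (List Char × List (List Char))) (h : pvRel st bs) :
    pvFinishA st = pvRender (pvBuildB bs) := by
  obtain ⟨d, ck, cv⟩ := st
  cases ck with
  | none =>
    obtain ⟨hd, hbs⟩ := h
    subst hd hbs
    rfl
  | some k =>
    obtain ⟨hk, flushed, parts, hbs, hparts, hcv, hd⟩ := h
    simp only at hcv hd
    subst hbs hcv hd
    simp [pvFinishA, hk, pvBuildB_append_singleton, pvRender]

-- == state machine = recursive segmentation ==

theorem pvFoldB_from_block (lines : List (List Char)) :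
    ∀ (pre : List (List Char × List (List Char))) (k : List Char) (ps : List (List Char)),
    lines.foldl pvStepB (pre ++ [(k, ps)])
      = pre ++ [(k, ps ++ (lines.takeWhile (fun x => !pvIsHdrLine x)).map PySem.Chars.strip)]
          ++ pvSeg (lines.dropWhile (fun x => !pvIsHdrLine x)) := by
  induction lines with
  | nil => intro pre k ps; simp [pvSeg_nil]
  | cons l rest ih =>
    intro pre k ps
    by_cases hl : pvIsHdrLine l
    · rw [List.foldl_cons,
        show pvStepB (pre ++ [(k, ps)]) l
            = (pre ++ [(k, ps)]) ++ [(PySem.Chars.strip (PySem.Chars.slice l none (some 12)),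
                [PySem.Chars.strip (PySem.Chars.slice l (some 12) none)])] by
          simp [pvStepB, hl],
        ih]
      have hb' : (!pvIsHdrLine l) = false := by simp [hl]
      rw [List.takeWhile_cons, List.dropWhile_cons]
      simp only [hb', Bool.false_eq_true, reduceIte]
      rw [pvSeg_cons]
      simp [hl]
    · have hb : pvIsHdrLine l = false := by simpa using hl
      rw [List.foldl_cons,
        show pvStepB (pre ++ [(k, ps)]) l = pre ++ [(k, ps ++ [PySem.Chars.strip l])] by
          simp [pvStepB, hb, pvAppendLast_eq],
        ih]
      simp [List.takeWhile_cons, List.dropWhile_cons, hb]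

theorem pvFoldB_eq_seg (lines : List (List Char)) :
    lines.foldl pvStepB [] = pvSeg lines := by
  induction lines with
  | nil => exact pvSeg_nil.symm
  | cons l rest ih =>
    by_cases hl : pvIsHdrLine l
    · rw [List.foldl_cons,
        show pvStepB [] l
            = [] ++ [(PySem.Chars.strip (PySem.Chars.slice l none (some 12)),
                [PySem.Chars.strip (PySem.Chars.slice l (some 12) none)])] by
          simp [pvStepB, hl],
        pvFoldB_from_block]
      rw [pvSeg_cons]
      simp [hl]
    · have hb : pvIsHdrLine l = false := by simpa using hl
      rw [List.foldl_cons, show pvStepB [] l = [] by simp [pvStepB, hb], ih, pvSeg_cons]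
      simp [hb]

-- == facts about pvStarts ==

theorem pvEnumerate_shift {α : Type} (xs : List α) (s : Int) :
    PySem.List.enumerate xs (s + 1) = (PySem.List.enumerate xs s).map (fun p => (p.1 + 1, p.2)) := by
  induction xs generalizing s with
  | nil => simp [PySem.List.enumerate_nil]
  | cons x xs ih => simp [PySem.List.enumerate_cons, ih]

theorem pvStarts_cons (l : List Char) (ls : List (List Char)) :
    pvStarts (l :: ls)
      = (if pvIsHdrLine l then [(0 : Int)] else []) ++ (pvStarts ls).map (· + 1) := by
  unfold pvStarts
  rw [PySem.List.enumerate_cons, show (0 : Int) + 1 = 0 + 1 by ring, pvEnumerate_shift]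
  simp only [List.filter_cons, List.filter_map, List.map_map]
  by_cases h : pvIsHdrLine l <;> simp [h, Function.comp_def]

theorem pvStarts_nonneg (ls : List (List Char)) : ∀ e ∈ pvStarts ls, 0 ≤ e := by
  induction ls with
  | nil => simp [pvStarts, PySem.List.enumerate_nil]
  | cons l ls ih =>
    intro e he
    rw [pvStarts_cons] at he
    rcases List.mem_append.1 he with h | h
    · split at h <;> simp_all
    · obtain ⟨e', he', rfl⟩ := List.mem_map.1 h
      have := ih e' he'
      omega

theorem pvStarts_nil_takeWhile (ls : List (List Char)) (h : pvStarts ls = []) :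
    ls.takeWhile (fun x => !pvIsHdrLine x) = ls := by
  induction ls with
  | nil => rfl
  | cons l ls ih =>
    rw [pvStarts_cons] at h
    by_cases hl : pvIsHdrLine l
    · simp [hl] at h
    · simp only [hl, if_neg, List.nil_append] at h
      simp only [List.takeWhile_cons, hl, Bool.not_false, if_pos]
      rw [ih (by simpa using h)]

theorem pvStarts_head_take (ls : List (List Char)) (e : Int) (t : List Int)
    (h : pvStarts ls = e :: t) :
    ls.take e.toNat = ls.takeWhile (fun x => !pvIsHdrLine x) := by
  induction ls generalizing e t with
  | nil => simp [pvStarts, PySem.List.enumerate_nil] at h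
  | cons l ls ih =>
    rw [pvStarts_cons] at h
    by_cases hl : pvIsHdrLine l
    · simp only [hl, if_pos, List.singleton_append] at h
      injection h with h1 h2
      subst h1
      simp [List.takeWhile_cons, hl]
    · have hb : pvIsHdrLine l = false := by simpa using hl
      rw [hb] at h
      simp only [Bool.false_eq_true, if_neg, List.nil_append, reduceIte] at h
      rcases heq : pvStarts ls with _ | ⟨e', t'⟩
      · rw [heq] at h; simp at h
      · rw [heq] at h
        simp only [List.map_cons] at h
        injection h with h1 h2
        have h0 : 0 ≤ e' := pvStarts_nonneg ls e' (by rw [heq]; exact List.mem_cons_self ..)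
        subst h1
        have hnat : (e' + 1).toNat = e'.toNat + 1 := by omega
        rw [hnat, List.take_succ_cons, List.takeWhile_cons]
        simp only [hb, Bool.not_false, if_pos]
        rw [ih e' t' heq]

theorem pvSeg_dropWhile (ls : List (List Char)) :
    pvSeg (ls.dropWhile (fun x => !pvIsHdrLine x)) = pvSeg ls := by
  induction ls with
  | nil => rfl
  | cons l ls ih =>
    by_cases hl : pvIsHdrLine l
    · simp [List.dropWhile_cons, hl]
    · have hb : pvIsHdrLine l = false := by simpa using hl
      rw [List.dropWhile_cons]
      simp only [hb, Bool.not_false, if_pos]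
      rw [ih, pvSeg_cons]
      simp [hb]

-- == B's block list = recursive segmentation ==

theorem pvBlockOf_shift (l : List Char) (rest : List (List Char)) (s e : Int)
    (hs : 0 ≤ s) (he : 0 ≤ e) :
    pvBlockOf (l :: rest) (s + 1, e + 1) = pvBlockOf rest (s, e) := by
  unfold pvBlockOf
  have hgd : PySem.List.pyGetD (l :: rest) (s + 1) ([] : List Char)
      = PySem.List.pyGetD rest s [] := by
    have h1 : s = ((s.toNat : Nat) : Int) := by omega
    have h2 : s + 1 = ((s.toNat + 1 : Nat) : Int) := by omega
    rw [h2, h1, PySem.List.pyGetD_natCast, PySem.List.pyGetD_natCast]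
    rfl
  have hsl : PySem.List.slice (l :: rest) (some (s + 1 + 1)) (some (e + 1))
      = PySem.List.slice rest (some (s + 1)) (some e) := by
    rw [PySem.List.slice_toNat _ (by omega) (by omega),
        PySem.List.slice_toNat _ (by omega) he]
    have h3 : (s + 1 + 1).toNat = s.toNat + 2 := by omega
    have h4 : (s + 1).toNat = s.toNat + 1 := by omega
    have h5 : (e + 1).toNat = e.toNat + 1 := by omega
    rw [h3, h4, h5]
    simp only [List.drop_succ_cons]
    congr 1
    omega
  simp only [hgd, hsl]

theorem pvZip_head {α : Type} (a b : α) (xs : List α) :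
    (a :: xs).zip (xs ++ [b]) = (a, (xs ++ [b]).headD b) :: xs.zip (xs.drop 1 ++ [b]) := by
  cases xs <;> simp

theorem pvBlocks_shift (l : List Char) (rest : List (List Char)) :
    (((pvStarts rest).map (· + 1)).zip
        ((((pvStarts rest).map (· + 1)).drop 1) ++ [((rest.length : Int) + 1)])).map
      (pvBlockOf (l :: rest)) = pvBlocks rest := by
  unfold pvBlocks
  have hmap : (((pvStarts rest).map (· + 1)).drop 1) ++ [((rest.length : Int) + 1)]
      = (((pvStarts rest).drop 1) ++ [(rest.length : Int)]).map (· + 1) := by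
    simp [← List.map_drop]
  rw [hmap, List.zip_map, List.map_map]
  apply List.map_congr_left
  intro a ha
  obtain ⟨s, e⟩ := a
  obtain ⟨hs, he⟩ := List.of_mem_zip ha
  have hs0 : 0 ≤ s := pvStarts_nonneg rest s hs
  have he0 : 0 ≤ e := by
    rcases List.mem_append.1 he with h | h
    · exact pvStarts_nonneg rest e (List.mem_of_mem_drop h)
    · simp only [List.mem_singleton] at h
      subst h
      positivity
  simpa [Prod.map] using pvBlockOf_shift l rest s e hs0 he0

theorem pvBlocks_eq_seg (lines : List (List Char)) : pvBlocks lines = pvSeg lines := by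
  induction lines with
  | nil => simp [pvBlocks, pvStarts, PySem.List.enumerate_nil, pvSeg_nil]
  | cons l rest ih =>
    have hlen : ((l :: rest).length : Int) = (rest.length : Int) + 1 := by
      simp
    by_cases hl : pvIsHdrLine l
    · rw [pvSeg_cons]
      simp only [hl, if_pos]
      unfold pvBlocks
      rw [pvStarts_cons]
      simp only [hl, if_pos, List.singleton_append, hlen]
      simp only [List.drop_succ_cons, List.drop_zero]
      rw [pvZip_head, List.map_cons]
      rw [show (((pvStarts rest).map (· + 1)).drop 1 ++ [(rest.length : Int) + 1])
            = (((pvStarts rest).map (· + 1)).drop 1) ++ [((rest.length : Int) + 1)] from rfl]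
      rw [pvBlocks_shift l rest, ih, pvSeg_dropWhile]
      congr 1
      -- head block: pvBlockOf (l :: rest) (0, e0) is the first segment
      unfold pvBlockOf
      simp only [PySem.List.pyGetD_zero_cons]
      have hall : ∀ x ∈ ((pvStarts rest).map (· + 1) ++ [(rest.length : Int) + 1]), 0 ≤ x := by
        intro x hx
        rcases List.mem_append.1 hx with h | h
        · obtain ⟨y, hy, rfl⟩ := List.mem_map.1 h
          have := pvStarts_nonneg rest y hy
          omega
        · simp only [List.mem_singleton] at h
          subst h
          positivity
      have he0 : (0 : Int) ≤ ((pvStarts rest).map (· + 1) ++ [(rest.length : Int) + 1]).headD ((rest.length : Int) + 1) := by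
        cases hC : (pvStarts rest).map (· + 1) with
        | nil =>
          simp only [List.nil_append, List.headD_cons]
          positivity
        | cons a t =>
          have ha : 0 ≤ a := hall a (by rw [hC]; exact List.mem_append_left _ (List.mem_cons_self ..))
          simp only [List.cons_append, List.headD_cons]
          exact ha
      have hsl : PySem.List.slice (l :: rest) (some (0 + 1))
            (some (((pvStarts rest).map (· + 1) ++ [(rest.length : Int) + 1]).headD ((rest.length : Int) + 1)))
          = rest.takeWhile (fun x => !pvIsHdrLine x) := by
        rw [PySem.List.slice_toNat _ (by omega) he0]
        rcases heq : pvStarts rest with _ | ⟨e', t'⟩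
        · simp only [List.map_nil, List.nil_append, List.headD_cons]
          have h2 : ((rest.length : Int) + 1).toNat - ((0 : Int) + 1).toNat = rest.length := by omega
          rw [h2, show ((0 : Int) + 1).toNat = 1 by norm_num]
          simp only [List.drop_one, List.tail_cons]
          rw [List.take_of_length_le (by omega), pvStarts_nil_takeWhile rest heq]
        · have h0 : 0 ≤ e' := pvStarts_nonneg rest e' (by rw [heq]; exact List.mem_cons_self ..)
          simp only [List.map_cons, List.cons_append, List.headD_cons]
          have h2 : (e' + 1).toNat - ((0 : Int) + 1).toNat = e'.toNat := by omega
          rw [h2, show ((0 : Int) + 1).toNat = 1 by norm_num]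
          simp only [List.drop_one, List.tail_cons]
          exact pvStarts_head_take rest e' t' heq
      rw [hsl]
    · have hb : pvIsHdrLine l = false := by simpa using hl
      rw [pvSeg_cons]
      simp only [hb, Bool.false_eq_true, if_neg, reduceIte]
      rw [← ih, ← pvBlocks_shift l rest]
      unfold pvBlocks
      rw [pvStarts_cons]
      simp [hb, hlen]

theorem pvAlt_eq (text : String) :
    parse_kegg_response_alt text
      = pvRender (pvBuildB (pvBlocks ((PySem.Str.splitlines text).map String.toList))) := by
  unfold parse_kegg_response_alt pvBlocks pvBuildB pvRender
  rw [List.foldl_map]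
  rfl

-- ===== VERDICT (by name: the statement is the Claim_ definition above) =====
theorem parse_kegg_response_spec : Claim_equal_parse_kegg_response := by
  intro text _
  unfold Spec_parse_kegg_response
  have hA : parse_kegg_response text
      = pvRender (pvBuildB (((PySem.Str.splitlines text).map String.toList).foldl pvStepB [])) :=
    pvFinish_rel _ _ (pvFold_rel ((PySem.Str.splitlines text).map String.toList)
      (PySem.Dict.empty, none, []) [] ⟨rfl, rfl⟩)
  rw [hA, pvFoldB_eq_seg, ← pvBlocks_eq_seg, pvAlt_eq]
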